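-- pv_equiv track=rewrite | github.com/xiaoxiandezhuque/python | com/xiaoshuo/xiaoshuo/xiaoshuo/spiders/xiaoshuo.py | cleanNewUrl
-- ===== SOURCE A (Python) =====
-- def cleanNewUrl(urls, saveUrl):
--     urls = urls[::-1]
--     newUrls = []
--     for url in urls:
--         if url == saveUrl:
--             return newUrls
--         else:
--             newUrls.insert(0, url)
--     return newUrls
-- ===== SOURCE B (Python) =====
-- def cleanNewUrl(urls, saveUrl):
--     res = []
--     for url in urls:
--         if url == saveUrl:
--             res = []
--         else:
--             res.append(url)
--     return res
-- ===== Notes on version B (the rewrite author's own statement) =====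
-- stated objective: simpler
-- what changed: Replaces reversing the list, early-returning on the first match and prepending via insert(0,...) with a single forward pass that appends each element and resets the accumulator on every occurrence of saveUrl.
import Mathlib
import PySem

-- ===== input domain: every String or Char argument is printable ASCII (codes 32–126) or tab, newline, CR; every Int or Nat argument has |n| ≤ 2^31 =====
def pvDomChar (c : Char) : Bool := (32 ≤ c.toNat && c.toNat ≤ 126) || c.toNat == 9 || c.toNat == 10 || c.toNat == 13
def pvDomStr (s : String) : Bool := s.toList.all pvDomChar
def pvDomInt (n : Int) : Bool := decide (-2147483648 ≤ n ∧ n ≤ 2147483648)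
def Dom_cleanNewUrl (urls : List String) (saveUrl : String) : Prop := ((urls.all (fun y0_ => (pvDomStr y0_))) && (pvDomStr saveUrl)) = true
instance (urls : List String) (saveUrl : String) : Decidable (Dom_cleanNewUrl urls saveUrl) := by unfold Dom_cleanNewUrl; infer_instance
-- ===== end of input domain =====

-- B replaces A's reverse + early-return + prepend loop with one forward pass that resets the accumulator at each occurrence of saveUrl (simpler).


-- ===== PORT A =====
-- the loop over urls[::-1]: early return on match, else newUrls.insert(0, url)
def cleanNewUrlGo (saveUrl : String) : List String → List String → List String
  | [], newUrls => newUrls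
  | url :: rest, newUrls =>
      if url = saveUrl then newUrls
      else cleanNewUrlGo saveUrl rest (url :: newUrls)

def cleanNewUrl (urls : List String) (saveUrl : String) : List String :=
  cleanNewUrlGo saveUrl urls.reverse []

-- ===== PORT B =====
def cleanNewUrl_alt (urls : List String) (saveUrl : String) : List String :=
  urls.foldl (fun res url => if url = saveUrl then [] else res ++ [url]) []

-- ===== PRECONDITION & SPEC =====
def Spec_cleanNewUrl (urls : List String) (saveUrl : String) (out : List String) : Prop := out = cleanNewUrl_alt urls saveUrl
instance (urls : List String) (saveUrl : String) (out : List String) : Decidable (Spec_cleanNewUrl urls saveUrl out) := by unfold Spec_cleanNewUrl; infer_instance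

-- ===== CLAIM (what is proved, stated in full; the proofs are below) =====
def Claim_equal_cleanNewUrl : Prop := ∀ (urls : List String) (saveUrl : String), Dom_cleanNewUrl urls saveUrl → Spec_cleanNewUrl urls saveUrl (cleanNewUrl urls saveUrl)

-- ===== LEMMAS AND PROOFS =====

-- A's loop computes the reversed longest match-free prefix of its input, prepended to the accumulator.
theorem cleanNewUrlGo_eq (saveUrl : String) (r acc : List String) :
    cleanNewUrlGo saveUrl r acc = (r.takeWhile (fun u => !(u == saveUrl))).reverse ++ acc := by
  induction r generalizing acc with
  | nil => simp [cleanNewUrlGo]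
  | cons u rest ih =>
      by_cases h : u = saveUrl
      · simp [cleanNewUrlGo, h]
      · simp [cleanNewUrlGo, h, ih]

-- B's fold computes the suffix after the last occurrence of saveUrl, i.e. the same value.
theorem foldl_reset_eq (saveUrl : String) (l : List String) :
    l.foldl (fun res url => if url = saveUrl then [] else res ++ [url]) []
      = (l.reverse.takeWhile (fun u => !(u == saveUrl))).reverse := by
  induction l using List.reverseRecOn with
  | nil => simp
  | append_singleton l u ih =>
      rw [List.foldl_append]
      by_cases h : u = saveUrl
      · simp [h]
      · simp [h, ih]

-- ===== VERDICT (by name: the statement is the Claim_ definition above) =====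
theorem cleanNewUrl_spec : Claim_equal_cleanNewUrl := by
  intro urls saveUrl _
  unfold Spec_cleanNewUrl cleanNewUrl cleanNewUrl_alt
  rw [cleanNewUrlGo_eq, foldl_reset_eq]
  simp
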